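-- pv_equiv track=rewrite | github.com/ggalancs/hfl | src/hfl/hub/resolver.py | _is_quantization
-- ===== SOURCE A (Python) =====
-- def _get_quant_levels() -> list[str]:
--     """List of known quantization levels."""
--     return [
--         "Q2_K",
--         "Q3_K_S",
--         "Q3_K_M",
--         "Q3_K_L",
--         "Q4_0",
--         "Q4_1",
--         "Q4_K_S",
--         "Q4_K_M",
--         "Q5_0",
--         "Q5_1",
--         "Q5_K_S",
--         "Q5_K_M",
--         "Q6_K",
--         "Q8_0",
--         "F16",
--         "F32",
--         "IQ1_S",
--         "IQ1_M",
--         "IQ2_XXS",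
--         "IQ2_XS",
--         "IQ2_S",
--         "IQ2_M",
--         "IQ3_XXS",
--         "IQ3_XS",
--         "IQ3_S",
--         "IQ3_M",
--         "IQ4_NL",
--         "IQ4_XS",
--     ]
--
-- def _is_quantization(s: str) -> bool:
--     """Check if a string looks like a quantization level."""
--     if not s:
--         return False
--     upper = s.upper()
--     # Check for exact or partial match with known levels
--     for q in _get_quant_levels():
--         if upper == q or upper == q.replace("_", ""):
--             return True
--     # Generic pattern: Q followed by number, or F16/F32, or IQ
--     if upper.startswith(("Q", "F", "IQ")) and any(c.isdigit() for c in upper):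
--         return True
--     return False
-- ===== SOURCE B (Python) =====
-- def _is_quantization(s: str) -> bool:
--     """Check if a string looks like a quantization level."""
--     if not s:
--         return False
--     upper = s.upper()
--     return upper.startswith(("Q", "F", "IQ")) and any(c.isdigit() for c in upper)
-- ===== Notes on version B (the rewrite author's own statement) =====
-- stated objective: simpler
-- what changed: B drops the 28-entry known-levels table and its scan entirely and decides from the generic predicate alone (prefix Q/F/IQ plus a digit), which provably subsumes every table entry and its underscore-free variant.
import Mathlib
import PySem

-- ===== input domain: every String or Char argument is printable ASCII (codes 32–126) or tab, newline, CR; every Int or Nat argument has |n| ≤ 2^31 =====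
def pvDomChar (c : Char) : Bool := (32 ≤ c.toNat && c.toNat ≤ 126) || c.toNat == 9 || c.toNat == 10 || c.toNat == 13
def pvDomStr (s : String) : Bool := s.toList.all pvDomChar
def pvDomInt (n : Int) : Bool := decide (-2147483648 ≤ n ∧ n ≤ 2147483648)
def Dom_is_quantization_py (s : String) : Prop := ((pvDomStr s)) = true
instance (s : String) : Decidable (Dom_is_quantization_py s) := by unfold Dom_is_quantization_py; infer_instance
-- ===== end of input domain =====

-- B drops the redundant known-levels table scan and decides from the generic predicate alone (simpler).

-- ===== PORT A =====
def quantLevels : List String :=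
  ["Q2_K", "Q3_K_S", "Q3_K_M", "Q3_K_L", "Q4_0", "Q4_1", "Q4_K_S", "Q4_K_M",
   "Q5_0", "Q5_1", "Q5_K_S", "Q5_K_M", "Q6_K", "Q8_0", "F16", "F32",
   "IQ1_S", "IQ1_M", "IQ2_XXS", "IQ2_XS", "IQ2_S", "IQ2_M",
   "IQ3_XXS", "IQ3_XS", "IQ3_S", "IQ3_M", "IQ4_NL", "IQ4_XS"]

def is_quantization_py (s : String) : Bool :=
  if s = "" then false
  else
    let upper := PySem.Str.upper s
    -- 'for q in _get_quant_levels(): if …: return True' = early-exit scan = List.any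
    if quantLevels.any (fun q => upper == q || upper == PySem.Str.replace q "_" "") then true
    else if (PySem.Str.startswith upper "Q" || PySem.Str.startswith upper "F"
              || PySem.Str.startswith upper "IQ")
            && upper.toList.any PySem.Chars.isdigit then true
    else false

-- ===== PORT B =====
def is_quantization_py_alt (s : String) : Bool :=
  if s = "" then false
  else
    let upper := PySem.Str.upper s
    (PySem.Str.startswith upper "Q" || PySem.Str.startswith upper "F"
      || PySem.Str.startswith upper "IQ")
    && upper.toList.any PySem.Chars.isdigit

-- ===== PRECONDITION & SPEC =====
def Spec_is_quantization_py (s : String) (out : Bool) : Prop := out = is_quantization_py_alt s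
instance (s : String) (out : Bool) : Decidable (Spec_is_quantization_py s out) := by unfold Spec_is_quantization_py; infer_instance

-- ===== CLAIM (what is proved, stated in full; the proofs are below) =====
def Claim_equal_is_quantization_py : Prop := ∀ (s : String), Dom_is_quantization_py s → Spec_is_quantization_py s (is_quantization_py s)

-- ===== LEMMAS AND PROOFS =====

-- every table entry (and its underscore-free form) also satisfies the generic predicate
theorem quant_loop_imp_generic (u : String)
    (h : quantLevels.any (fun q => u == q || u == PySem.Str.replace q "_" "") = true) :
    ((PySem.Str.startswith u "Q" || PySem.Str.startswith u "F"
        || PySem.Str.startswith u "IQ")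
      && u.toList.any PySem.Chars.isdigit) = true := by
  obtain ⟨q, hq, hu⟩ := List.any_eq_true.mp h
  fin_cases hq <;>
    · simp only [Bool.or_eq_true, beq_iff_eq] at hu
      rcases hu with rfl | rfl <;> decide

-- ===== VERDICT (by name: the statement is the Claim_ definition above) =====
theorem is_quantization_py_spec : Claim_equal_is_quantization_py := by
  intro s _
  unfold Spec_is_quantization_py is_quantization_py is_quantization_py_alt
  by_cases hs : s = ""
  · simp [hs]
  · simp only [if_neg hs]
    by_cases hl : quantLevels.any
        (fun q => PySem.Str.upper s == q
          || PySem.Str.upper s == PySem.Str.replace q "_" "") = true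
    · rw [if_pos hl]
      exact (quant_loop_imp_generic _ hl).symm
    · rw [if_neg hl]
      split <;> simp_all
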